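-- pv_equiv track=rewrite | github.com/noshiket/tsavs_cutter | tsavs_cutter.py | find_trim_chapter_mapping
-- ===== SOURCE A (Python) =====
-- from typing import List, Optional, Set, Tuple
--
-- def find_trim_chapter_mapping(
--     trim_specs: List[tuple],
--     filtered_jls_segments: List[Tuple[int, int, int, str]],
--     chapter_times: List[float]
-- ) -> List[Tuple[int, int]]:
--     """
--     各Trim範囲に対応するチャプター番号のペアを見つける
--
--     フィルタ済みJLSセグメントの境界がチャプターポイント
--     セグメント間の境界がチャプターになる
--
--     Returns:
--         List[Tuple[int, int]]: [(start_chapter, end_chapter), ...]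
--     """
--     mappings = []
--
--     # セグメントを開始フレームでソート
--     sorted_segments = sorted(filtered_jls_segments, key=lambda x: x[0])
--
--     # 各Trim範囲のチャプター番号を決定
--     chapter_offset = 0  # 現在のチャプターオフセット
--
--     for trim_start, trim_end in trim_specs:
--         # このTrim範囲内のセグメントを見つける
--         segments_in_trim = []
--         for seg_start, seg_end, duration, label in sorted_segments:
--             if seg_start >= trim_start and seg_end <= trim_end:
--                 segments_in_trim.append((seg_start, seg_end))
--
--         if not segments_in_trim:
--             # フォールバック
--             mappings.append((chapter_offset, chapter_offset + 1))
--             chapter_offset += 1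
--             continue
--
--         # このTrimの開始チャプター = 現在のオフセット
--         start_chapter = chapter_offset
--
--         # このTrimの終了チャプター = 開始 + セグメント数
--         # セグメントが2つなら、その間に1つのチャプターポイントがあるので+2
--         end_chapter = start_chapter + len(segments_in_trim)
--
--         mappings.append((start_chapter, end_chapter))
--
--         # 次のTrimのために、オフセットを更新
--         chapter_offset = end_chapter
--
--     return mappings
-- ===== SOURCE B (Python) =====
-- def find_trim_chapter_mapping(
--     trim_specs,
--     filtered_jls_segments,
--     chapter_times
-- ):
--     # One pass over segments accumulating per-trim counts (no sort: only the
--     # count of segments inside each trim matters), then one prefix-sum pass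
--     # turning counts into (start_chapter, end_chapter) pairs.
--     counts = [0] * len(trim_specs)
--     for seg_start, seg_end, _duration, _label in filtered_jls_segments:
--         counts = [c + 1 if seg_start >= ts and seg_end <= te else c
--                   for c, (ts, te) in zip(counts, trim_specs)]
--     mappings = []
--     offset = 0
--     for c in counts:
--         step = c if c > 0 else 1
--         mappings.append((offset, offset + step))
--         offset += step
--     return mappings
-- ===== Notes on version B (the rewrite author's own statement) =====
-- stated objective: alternative
-- what changed: B swaps the loop nesting: instead of sorting the segments and, per trim, scanning all segments into a temporary list while threading a running chapter offset, B makes one pass over the (unsorted) segments accumulating a per-trim count vector, then a prefix-sum pass turns the counts (with empty trims counting as 1) into the offset pairs.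
import Mathlib
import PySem

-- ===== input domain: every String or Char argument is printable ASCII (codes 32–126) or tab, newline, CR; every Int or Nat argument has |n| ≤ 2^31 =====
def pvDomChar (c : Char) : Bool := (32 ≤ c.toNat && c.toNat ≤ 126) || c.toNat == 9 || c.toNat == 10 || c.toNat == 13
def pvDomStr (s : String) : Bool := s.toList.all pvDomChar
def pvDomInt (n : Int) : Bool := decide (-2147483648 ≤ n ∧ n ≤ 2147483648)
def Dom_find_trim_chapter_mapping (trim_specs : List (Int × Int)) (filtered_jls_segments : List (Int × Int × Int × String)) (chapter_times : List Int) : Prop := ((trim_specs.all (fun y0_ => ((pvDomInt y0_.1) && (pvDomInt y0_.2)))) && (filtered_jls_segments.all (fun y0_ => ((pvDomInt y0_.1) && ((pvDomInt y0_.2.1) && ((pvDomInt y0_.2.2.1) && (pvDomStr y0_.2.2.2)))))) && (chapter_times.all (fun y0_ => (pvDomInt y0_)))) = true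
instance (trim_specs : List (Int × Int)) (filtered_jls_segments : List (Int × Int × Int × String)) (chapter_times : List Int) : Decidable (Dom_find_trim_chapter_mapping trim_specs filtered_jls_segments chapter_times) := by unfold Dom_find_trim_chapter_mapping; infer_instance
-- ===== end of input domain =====

-- B swaps the loop nesting: one pass over segments building per-trim counts, then a prefix-sum pass; A sorts and rescans segments per trim.
-- ===== PORT A =====
def find_trim_chapter_mapping (trim_specs : List (Int × Int)) (filtered_jls_segments : List (Int × Int × Int × String)) (chapter_times : List Int) : List (Int × Int) :=
  let sorted_segments := PySem.List.sorted filtered_jls_segments (fun x => x.1) false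
  (trim_specs.foldl (fun (st : List (Int × Int) × Int) tr =>
      let segments_in_trim := sorted_segments.foldl
        (fun acc q => if q.1 ≥ tr.1 ∧ q.2.1 ≤ tr.2 then acc ++ [(q.1, q.2.1)] else acc) []
      if segments_in_trim = [] then
        (st.1 ++ [(st.2, st.2 + 1)], st.2 + 1)
      else
        (st.1 ++ [(st.2, st.2 + (segments_in_trim.length : Int))], st.2 + (segments_in_trim.length : Int))
    ) ([], 0)).1

-- ===== PORT B =====
def find_trim_chapter_mapping_alt (trim_specs : List (Int × Int)) (filtered_jls_segments : List (Int × Int × Int × String)) (chapter_times : List Int) : List (Int × Int) :=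
  let counts := filtered_jls_segments.foldl
    (fun counts q =>
      List.zipWith (fun (c : Int) (t : Int × Int) => if q.1 ≥ t.1 ∧ q.2.1 ≤ t.2 then c + 1 else c) counts trim_specs)
    (List.replicate trim_specs.length (0 : Int))
  (counts.foldl (fun (st : List (Int × Int) × Int) c =>
      let step := if c > 0 then c else 1
      (st.1 ++ [(st.2, st.2 + step)], st.2 + step)) ([], 0)).1

-- ===== PRECONDITION & SPEC =====
def Spec_find_trim_chapter_mapping (trim_specs : List (Int × Int)) (filtered_jls_segments : List (Int × Int × Int × String)) (chapter_times : List Int) (out : List (Int × Int)) : Prop := out = find_trim_chapter_mapping_alt trim_specs filtered_jls_segments chapter_times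
instance (trim_specs : List (Int × Int)) (filtered_jls_segments : List (Int × Int × Int × String)) (chapter_times : List Int) (out : List (Int × Int)) : Decidable (Spec_find_trim_chapter_mapping trim_specs filtered_jls_segments chapter_times out) := by unfold Spec_find_trim_chapter_mapping; infer_instance

-- ===== CLAIM (what is proved, stated in full; the proofs are below) =====
def Claim_equal_find_trim_chapter_mapping : Prop := ∀ (trim_specs : List (Int × Int)) (filtered_jls_segments : List (Int × Int × Int × String)) (chapter_times : List Int), Dom_find_trim_chapter_mapping trim_specs filtered_jls_segments chapter_times → Spec_find_trim_chapter_mapping trim_specs filtered_jls_segments chapter_times (find_trim_chapter_mapping trim_specs filtered_jls_segments chapter_times)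

-- ===== LEMMAS AND PROOFS =====

-- number of segments fitting inside trim t
def pvCnt (segs : List (Int × Int × Int × String)) (t : Int × Int) : Nat :=
  segs.countP (fun q => decide (q.1 ≥ t.1 ∧ q.2.1 ≤ t.2))

-- the shared second pass: counts → offset pairs
def pvPass2 (counts : List Int) : List (Int × Int) :=
  (counts.foldl (fun (st : List (Int × Int) × Int) c =>
      let step := if c > 0 then c else 1
      (st.1 ++ [(st.2, st.2 + step)], st.2 + step)) ([], 0)).1

theorem pvZipWith_comp {α β γ : Type} (g : α → β → α) (f : α → β → γ) :
    ∀ (as : List α) (bs : List β),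
      List.zipWith f (List.zipWith g as bs) bs = List.zipWith (fun a b => f (g a b) b) as bs := by
  intro as
  induction as with
  | nil => intro bs; simp
  | cons a as ih => intro bs; cases bs with
    | nil => simp
    | cons b bs => simp [ih]

theorem pvZipWith_replicate {α β γ : Type} (f : α → β → γ) (a : α) :
    ∀ (bs : List β), List.zipWith f (List.replicate bs.length a) bs = bs.map (f a) := by
  intro bs
  induction bs with
  | nil => rfl
  | cons b bs ih => simp [List.replicate_succ, ih]

theorem pvB_counts (trim_specs : List (Int × Int)) (segs : List (Int × Int × Int × String))
    (cs0 : List Int) (h : cs0.length = trim_specs.length) :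
    segs.foldl
      (fun counts q =>
        List.zipWith (fun (c : Int) (t : Int × Int) => if q.1 ≥ t.1 ∧ q.2.1 ≤ t.2 then c + 1 else c) counts trim_specs)
      cs0
    = List.zipWith (fun (c : Int) t => c + (pvCnt segs t : Int)) cs0 trim_specs := by
  induction segs generalizing cs0 with
  | nil =>
      simp only [List.foldl_nil, pvCnt, List.countP_nil]
      have : (fun (c : Int) (t : Int × Int) => c + ((0 : Nat) : Int)) = fun c _ => c := by
        funext c t; simp
      rw [this]
      clear this
      induction cs0 generalizing trim_specs with
      | nil => simp
      | cons c cs ih => cases trim_specs with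
        | nil => simp at h
        | cons t ts => simp only [List.zipWith_cons_cons, List.cons.injEq, true_and]
                       exact ih ts (by simpa using h)
  | cons q rest ih =>
      simp only [List.foldl_cons]
      rw [ih _ (by simp [h])]
      rw [pvZipWith_comp]
      congr 1
      funext c t
      simp only [pvCnt, List.countP_cons]
      by_cases hf : q.1 ≥ t.1 ∧ q.2.1 ≤ t.2
      · simp [hf]; ring
      · simp [hf]

theorem pvFoldl_fun_congr {α β : Type} {f g : α → β → α} (h : ∀ a b, f a b = g a b) (i : α) (l : List β) :
    l.foldl f i = l.foldl g i := by
  have : f = g := by funext a b; exact h a b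
  rw [this]

theorem pvA_eq (trim_specs : List (Int × Int)) (segs : List (Int × Int × Int × String)) (ct : List Int) :
    find_trim_chapter_mapping trim_specs segs ct
    = pvPass2 (trim_specs.map (fun t => (pvCnt segs t : Int))) := by
  unfold find_trim_chapter_mapping pvPass2
  rw [List.foldl_map]
  have key : ∀ (st : List (Int × Int) × Int) (tr : Int × Int),
      (let segments_in_trim := (PySem.List.sorted segs (fun x => x.1) false).foldl
          (fun acc q => if q.1 ≥ tr.1 ∧ q.2.1 ≤ tr.2 then acc ++ [(q.1, q.2.1)] else acc) [];
       if segments_in_trim = [] then (st.1 ++ [(st.2, st.2 + 1)], st.2 + 1)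
       else (st.1 ++ [(st.2, st.2 + (segments_in_trim.length : Int))], st.2 + (segments_in_trim.length : Int)))
      = (let step := if ((pvCnt segs tr : Int)) > 0 then ((pvCnt segs tr : Int)) else 1;
         (st.1 ++ [(st.2, st.2 + step)], st.2 + step)) := by
    intro st tr
    have hfold : (PySem.List.sorted segs (fun x => x.1) false).foldl
        (fun acc q => if q.1 ≥ tr.1 ∧ q.2.1 ≤ tr.2 then acc ++ [(q.1, q.2.1)] else acc) ([] : List (Int × Int))
        = ((PySem.List.sorted segs (fun x => x.1) false).filter
            (fun q => decide (q.1 ≥ tr.1 ∧ q.2.1 ≤ tr.2))).map (fun q => (q.1, q.2.1)) := by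
      rw [PySem.List.foldl_append_ite]
      simp
    have hcnt : ((PySem.List.sorted segs (fun x => x.1) false).filter
        (fun q => decide (q.1 ≥ tr.1 ∧ q.2.1 ≤ tr.2))).length = pvCnt segs tr := by
      rw [← List.countP_eq_length_filter]
      exact (PySem.List.sorted_perm segs (fun x => x.1) false).countP_eq _
    rw [hfold]
    by_cases hz : pvCnt segs tr = 0
    · have hnil : ((PySem.List.sorted segs (fun x => x.1) false).filter
          (fun q => decide (q.1 ≥ tr.1 ∧ q.2.1 ≤ tr.2))) = [] := by
        rw [← List.length_eq_zero_iff, hcnt, hz]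
      rw [if_pos (by rw [hnil]; rfl)]
      show _ = (st.1 ++ [(st.2, st.2 + if ((pvCnt segs tr : Int)) > 0 then ((pvCnt segs tr : Int)) else 1)],
                st.2 + if ((pvCnt segs tr : Int)) > 0 then ((pvCnt segs tr : Int)) else 1)
      rw [hz]
      norm_num
    · have hne : ((PySem.List.sorted segs (fun x => x.1) false).filter
          (fun q => decide (q.1 ≥ tr.1 ∧ q.2.1 ≤ tr.2))).map (fun q => (q.1, q.2.1)) ≠ [] := by
        intro hc
        apply hz
        rw [← hcnt, ← List.length_map (f := fun q => ((q.1, q.2.1) : Int × Int)), hc]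
        rfl
      have hpos : ((pvCnt segs tr : Int)) > 0 := by
        exact_mod_cast Nat.pos_of_ne_zero hz
      rw [if_neg hne]
      show _ = (st.1 ++ [(st.2, st.2 + if ((pvCnt segs tr : Int)) > 0 then ((pvCnt segs tr : Int)) else 1)],
                st.2 + if ((pvCnt segs tr : Int)) > 0 then ((pvCnt segs tr : Int)) else 1)
      rw [if_pos hpos, List.length_map, hcnt]
  exact congrArg Prod.fst (pvFoldl_fun_congr key _ _)

theorem pvB_eq (trim_specs : List (Int × Int)) (segs : List (Int × Int × Int × String)) (ct : List Int) :
    find_trim_chapter_mapping_alt trim_specs segs ct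
    = pvPass2 (trim_specs.map (fun t => (pvCnt segs t : Int))) := by
  unfold find_trim_chapter_mapping_alt pvPass2
  rw [pvB_counts _ _ _ (by simp), pvZipWith_replicate]
  simp

-- ===== VERDICT (by name: the statement is the Claim_ definition above) =====
theorem find_trim_chapter_mapping_spec : Claim_equal_find_trim_chapter_mapping := by
  intro trims segs ct _
  show find_trim_chapter_mapping trims segs ct = find_trim_chapter_mapping_alt trims segs ct
  rw [pvA_eq, pvB_eq]
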